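-- pv_equiv track=rewrite | github.com/ElizabethViera/AdventOfCode | AdventOfCode2024/Day 12/Day12.py | calculateFence
-- ===== SOURCE A (Python) =====
-- def add_pts(a, b):
--     return a[0] + b[0], a[1] + b[1]
--
-- def getNeighbors(p):
--     result = []
--     dirs = [(-1, 0), (1, 0), (0, -1), (0, 1)]
--     for dir in dirs:
--         new_pt = add_pts(dir, p)
--         result.append(new_pt)
--     return result
--
-- def calculateFence(veg: set[tuple[int, int]]):
--     perimeter = 0
--     area = 0
--     for v in veg:
--         neighbors = getNeighbors(v)
--         area += 1
--         for neighbor in neighbors: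
--             if neighbor not in veg:
--                 perimeter += 1
--     return area * perimeter
-- ===== SOURCE B (Python) =====
-- def calculateFence(veg: set[tuple[int, int]]):
--     area = len(veg)
--     shared = 0
--     for (x, y) in veg:
--         if (x + 1, y) in veg:
--             shared += 1
--         if (x, y + 1) in veg:
--             shared += 1
--     return area * (4 * area - 2 * shared)
-- ===== Notes on version B (the rewrite author's own statement) =====
-- stated objective: alternative
-- what changed: Instead of counting exterior edges four-per-cell, B counts each shared interior adjacency once via only the (+1,0) and (0,+1) neighbor offsets and uses the closed form perimeter = 4*area - 2*shared.
import Mathlib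
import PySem

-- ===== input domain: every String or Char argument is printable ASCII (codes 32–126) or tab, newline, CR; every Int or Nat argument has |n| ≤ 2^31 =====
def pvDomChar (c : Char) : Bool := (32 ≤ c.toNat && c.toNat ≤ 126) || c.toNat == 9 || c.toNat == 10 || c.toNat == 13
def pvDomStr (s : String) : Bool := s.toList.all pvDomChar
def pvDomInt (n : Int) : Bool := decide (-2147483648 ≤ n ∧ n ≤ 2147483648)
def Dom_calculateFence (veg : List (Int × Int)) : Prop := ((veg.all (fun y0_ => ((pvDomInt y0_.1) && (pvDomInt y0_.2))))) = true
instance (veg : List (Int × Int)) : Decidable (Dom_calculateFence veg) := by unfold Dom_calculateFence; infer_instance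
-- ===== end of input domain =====

-- B counts each shared interior adjacency once (two neighbor offsets) and uses perimeter = 4*area - 2*shared, instead of A's four exterior-edge checks per cell.


-- ===== PORT A =====
def add_pts (a b : Int × Int) : Int × Int := (a.1 + b.1, a.2 + b.2)

def getNeighbors (p : Int × Int) : List (Int × Int) :=
  ([(-1, 0), (1, 0), (0, -1), (0, 1)] : List (Int × Int)).foldl
    (fun result dir => result ++ [add_pts dir p]) []

def calculateFence (veg : List (Int × Int)) : Int :=
  let st := veg.foldl
    (fun (st : Int × Int) v =>
      let neighbors := getNeighbors v
      let area := st.2 + 1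
      let perimeter := neighbors.foldl
        (fun per neighbor => if neighbor ∉ veg then per + 1 else per) st.1
      (perimeter, area))
    (0, 0)
  st.2 * st.1

-- ===== PORT B =====
def calculateFence_alt (veg : List (Int × Int)) : Int :=
  let area : Int := veg.length
  let shared : Int := veg.foldl
    (fun sh v =>
      let sh := if (v.1 + 1, v.2) ∈ veg then sh + 1 else sh
      if (v.1, v.2 + 1) ∈ veg then sh + 1 else sh)
    0
  area * (4 * area - 2 * shared)

-- ===== PRECONDITION & SPEC =====
-- veg stands for a Python set, hence a list of DISTINCT pairs (the type convention);
-- Pre_ states exactly that and excludes no input the Python function receives.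
def Pre_calculateFence (veg : List (Int × Int)) : Prop := veg.Nodup
instance (veg : List (Int × Int)) : Decidable (Pre_calculateFence veg) := by
  unfold Pre_calculateFence; infer_instance

def pvWitness_calculateFence : (List (Int × Int)) := [(0, 0), (0, 1), (1, 0)]

def Spec_calculateFence (veg : List (Int × Int)) (out : Int) : Prop := out = calculateFence_alt veg
instance (veg : List (Int × Int)) (out : Int) : Decidable (Spec_calculateFence veg out) := by unfold Spec_calculateFence; infer_instance

-- ===== CLAIM (what is proved, stated in full; the proofs are below) =====
def Claim_equal_calculateFence : Prop := ∀ (veg : List (Int × Int)), Dom_calculateFence veg → Pre_calculateFence veg → Spec_calculateFence veg (calculateFence veg)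

-- ===== LEMMAS AND PROOFS =====

-- indicator of membership
def pvInd (veg : List (Int × Int)) (p : Int × Int) : Int := if p ∈ veg then 1 else 0

-- sum over v ∈ veg of the indicator that v shifted by (dx, dy) is again in veg
def pvS (veg : List (Int × Int)) (dx dy : Int) : Int :=
  (veg.map (fun v => pvInd veg (dx + v.1, dy + v.2))).sum

lemma foldA_eq (veg l : List (Int × Int)) (st : Int × Int) :
    l.foldl
      (fun (st : Int × Int) v =>
        let neighbors := getNeighbors v
        let area := st.2 + 1
        let perimeter := neighbors.foldl
          (fun per neighbor => if neighbor ∉ veg then per + 1 else per) st.1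
        (perimeter, area))
      st
    = (st.1 + (l.map (fun v =>
        4 - (pvInd veg (-1 + v.1, v.2) + pvInd veg (1 + v.1, v.2)
           + pvInd veg (v.1, -1 + v.2) + pvInd veg (v.1, 1 + v.2)))).sum,
       st.2 + l.length) := by
  induction l generalizing st with
  | nil => simp
  | cons x xs ih =>
    simp only [List.foldl_cons, ih, List.map_cons, List.sum_cons, List.length_cons]
    refine Prod.ext ?_ ?_
    · simp only [getNeighbors, add_pts, zero_add, pvInd, List.nil_append, List.cons_append, List.foldl_cons, List.foldl_nil]
      split_ifs <;> ring
    · push_cast; ring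

lemma foldB_eq (veg l : List (Int × Int)) (sh : Int) :
    l.foldl
      (fun sh v =>
        let sh := if (v.1 + 1, v.2) ∈ veg then sh + 1 else sh
        if (v.1, v.2 + 1) ∈ veg then sh + 1 else sh)
      sh
    = sh + (l.map (fun v => pvInd veg (1 + v.1, v.2) + pvInd veg (v.1, 1 + v.2))).sum := by
  induction l generalizing sh with
  | nil => simp
  | cons x xs ih =>
    simp only [List.foldl_cons, ih, List.map_cons, List.sum_cons, pvInd]
    have h1 : ((1 + x.1, x.2) : Int × Int) = (x.1 + 1, x.2) := by simp [add_comm]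
    have h2 : ((x.1, 1 + x.2) : Int × Int) = (x.1, x.2 + 1) := by simp [add_comm]
    rw [h1, h2]
    split_ifs <;> ring

lemma pvS_eq_card (veg : List (Int × Int)) (dx dy : Int) (hnd : veg.Nodup) :
    pvS veg dx dy
      = ((veg.toFinset.filter (fun v => (dx + v.1, dy + v.2) ∈ veg.toFinset)).card : Int) := by
  have h1 : ∀ l : List (Int × Int),
      (l.map (fun v => pvInd veg (dx + v.1, dy + v.2))).sum
        = ((l.filter (fun v => decide ((dx + v.1, dy + v.2) ∈ veg))).length : Int) := by
    intro l
    induction l with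
    | nil => simp
    | cons x xs ih =>
      simp only [List.map_cons, List.sum_cons, List.filter_cons, pvInd]
      simp only [pvInd] at ih ⊢
      by_cases h : (dx + x.1, dy + x.2) ∈ veg <;> simp [h, ih, add_comm]
  rw [pvS, h1]
  congr 1
  rw [← List.toFinset_card_of_nodup (hnd.filter _), List.toFinset_filter]
  congr 1
  apply Finset.filter_congr
  intro x hx
  simp [List.mem_toFinset]

lemma card_shift (s : Finset (Int × Int)) (dx dy : Int) :
    (s.filter (fun v => (dx + v.1, dy + v.2) ∈ s)).card
      = (s.filter (fun v => (-dx + v.1, -dy + v.2) ∈ s)).card := by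
  apply Finset.card_nbij' (i := fun v => (dx + v.1, dy + v.2))
    (j := fun v => (-dx + v.1, -dy + v.2))
  · intro a ha
    simp only [Finset.mem_coe, Finset.mem_filter] at ha ⊢
    exact ⟨ha.2, by simpa [neg_add_cancel_left] using ha.1⟩
  · intro a ha
    simp only [Finset.mem_coe, Finset.mem_filter] at ha ⊢
    exact ⟨ha.2, by simpa [add_neg_cancel_left] using ha.1⟩
  · intro a ha
    simp [neg_add_cancel_left]
  · intro a ha
    simp [add_neg_cancel_left]

lemma pvS_symm (veg : List (Int × Int)) (dx dy : Int) (hnd : veg.Nodup) :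
    pvS veg dx dy = pvS veg (-dx) (-dy) := by
  rw [pvS_eq_card veg dx dy hnd, pvS_eq_card veg (-dx) (-dy) hnd, card_shift]

lemma sum_split (veg l : List (Int × Int)) :
    (l.map (fun v =>
        4 - (pvInd veg (-1 + v.1, v.2) + pvInd veg (1 + v.1, v.2)
           + pvInd veg (v.1, -1 + v.2) + pvInd veg (v.1, 1 + v.2)))).sum
    = 4 * l.length
      - ((l.map (fun v => pvInd veg (-1 + v.1, v.2))).sum
       + (l.map (fun v => pvInd veg (1 + v.1, v.2))).sum
       + (l.map (fun v => pvInd veg (v.1, -1 + v.2))).sum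
       + (l.map (fun v => pvInd veg (v.1, 1 + v.2))).sum) := by
  induction l with
  | nil => simp
  | cons x xs ih =>
    simp only [List.map_cons, List.sum_cons, List.length_cons, ih]
    push_cast; ring

lemma sum_split_b (veg l : List (Int × Int)) :
    (l.map (fun v => pvInd veg (1 + v.1, v.2) + pvInd veg (v.1, 1 + v.2))).sum
    = (l.map (fun v => pvInd veg (1 + v.1, v.2))).sum
      + (l.map (fun v => pvInd veg (v.1, 1 + v.2))).sum := by
  induction l with
  | nil => simp
  | cons x xs ih =>
    simp only [List.map_cons, List.sum_cons, ih]; ring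

-- ===== VERDICT (by name: the statement is the Claim_ definition above) =====
theorem calculateFence_spec : Claim_equal_calculateFence := by
  intro veg _ hnd
  unfold Spec_calculateFence calculateFence calculateFence_alt
  simp only [foldA_eq veg veg, foldB_eq veg veg, sum_split veg veg, sum_split_b veg veg]
  have hW : (veg.map (fun v => pvInd veg (-1 + v.1, v.2))).sum = pvS veg (-1) 0 := by
    simp [pvS]
  have hE : (veg.map (fun v => pvInd veg (1 + v.1, v.2))).sum = pvS veg 1 0 := by
    simp [pvS]
  have hS : (veg.map (fun v => pvInd veg (v.1, -1 + v.2))).sum = pvS veg 0 (-1) := by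
    simp [pvS]
  have hN : (veg.map (fun v => pvInd veg (v.1, 1 + v.2))).sum = pvS veg 0 1 := by
    simp [pvS]
  have e1 : pvS veg (-1) 0 = pvS veg 1 0 := by
    simpa using pvS_symm veg (-1) 0 hnd
  have e2 : pvS veg 0 (-1) = pvS veg 0 1 := by
    simpa using pvS_symm veg 0 (-1) hnd
  rw [hW, hE, hS, hN, e1, e2]
  ring
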